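-- pv_equiv track=rewrite | github.com/fahmisalman/AI-Python | Naive-Bayes/Multinomial-Naive-Bayes/MultinomialNB.py | likelihood_probability
-- ===== SOURCE A (Python) =====
-- def likelihood_probability(x, y, a):
--     l = []
--     for i in range(len(a)):
--         temp = []
--         for j in range(len(y)):
--             if y[j] == a[i]:
--                 temp.append(x[j])
--         l.append(sum(temp) + 1)
--     return l
-- ===== SOURCE B (Python) =====
-- def likelihood_probability(x, y, a):
--     sums = {}
--     for yi, xi in zip(y, x):
--         sums[yi] = sums.get(yi, 0) + xi
--     return [sums.get(ai, 0) + 1 for ai in a]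
-- ===== Notes on version B (the rewrite author's own statement) =====
-- stated objective: faster
-- what changed: Replaces the nested scan of y for every class label by one pass over zip(y,x) accumulating per-label sums in a dict, then one lookup per label of a.
import Mathlib
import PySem

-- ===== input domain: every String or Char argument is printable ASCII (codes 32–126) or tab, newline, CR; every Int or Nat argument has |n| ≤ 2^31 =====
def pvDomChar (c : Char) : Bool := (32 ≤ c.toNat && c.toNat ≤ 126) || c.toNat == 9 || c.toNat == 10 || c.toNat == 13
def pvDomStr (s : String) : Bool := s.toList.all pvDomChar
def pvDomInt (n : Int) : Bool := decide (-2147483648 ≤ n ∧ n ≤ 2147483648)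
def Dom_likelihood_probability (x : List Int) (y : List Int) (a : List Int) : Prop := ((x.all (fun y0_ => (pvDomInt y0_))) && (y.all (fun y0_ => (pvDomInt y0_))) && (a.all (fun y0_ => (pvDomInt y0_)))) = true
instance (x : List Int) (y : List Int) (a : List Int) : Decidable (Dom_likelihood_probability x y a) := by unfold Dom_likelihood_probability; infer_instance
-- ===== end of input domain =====

-- B replaces A's per-label rescan of y by one pass over zip(y, x) accumulating per-label sums
-- in a dict, then one dict lookup per label of a (objective: faster, asymptotic).

-- ===== PORT A =====
def likelihood_probability (x : List Int) (y : List Int) (a : List Int) : List Int :=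
  (PySem.List.pyRange 0 a.length 1).foldl (fun l i =>
    l ++ [((PySem.List.pyRange 0 y.length 1).foldl (fun temp j =>
      if PySem.List.pyGetD y j 0 == PySem.List.pyGetD a i 0 then
        temp ++ [PySem.List.pyGetD x j 0]
      else temp) []).sum + 1]) []

-- ===== PORT B =====
def likelihood_probability_alt (x : List Int) (y : List Int) (a : List Int) : List Int :=
  let sums := (y.zip x).foldl (fun d p => d.insert p.1 (d.getD p.1 0 + p.2)) PySem.Dict.empty
  a.map (fun ai => sums.getD ai 0 + 1)

-- ===== PRECONDITION & SPEC =====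
-- Pre_ excludes exactly the inputs on which A raises IndexError: some index j of y with
-- j ≥ len(x) whose label y[j] occurs in a (then A evaluates x[j] out of range).
def Pre_likelihood_probability (x : List Int) (y : List Int) (a : List Int) : Prop :=
  ∀ j : Nat, j < y.length → x.length ≤ j → a.contains (y.getD j 0) = false
instance (x : List Int) (y : List Int) (a : List Int) : Decidable (Pre_likelihood_probability x y a) := by unfold Pre_likelihood_probability; infer_instance

def pvWitness_likelihood_probability : List Int × List Int × List Int := ([4, 5, 6], [1, 2, 1], [1, 2])

def Spec_likelihood_probability (x : List Int) (y : List Int) (a : List Int) (out : List Int) : Prop := out = likelihood_probability_alt x y a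
instance (x : List Int) (y : List Int) (a : List Int) (out : List Int) : Decidable (Spec_likelihood_probability x y a out) := by unfold Spec_likelihood_probability; infer_instance

-- ===== CLAIM (what is proved, stated in full; the proofs are below) =====
def Claim_equal_likelihood_probability : Prop := ∀ (x : List Int) (y : List Int) (a : List Int), Dom_likelihood_probability x y a → Pre_likelihood_probability x y a → Spec_likelihood_probability x y a (likelihood_probability x y a)

-- ===== LEMMAS AND PROOFS =====

-- A's inner loop, re-indexed to List.getD, equals the filtered sum over zip y x,
-- provided no out-of-range index carries a matching label.
theorem innerSum_eq_zip (y x : List Int) (v : Int)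
    (h : ∀ j : Nat, j < y.length → x.length ≤ j → y.getD j 0 ≠ v) :
    (((List.range y.length).filter (fun j => y.getD j 0 == v)).map (fun j => x.getD j 0)).sum
      = (((y.zip x).filter (fun p => p.1 == v)).map Prod.snd).sum := by
  induction y generalizing x with
  | nil => simp
  | cons yh yt ih =>
    cases x with
    | nil =>
      have hall : ∀ j ∈ List.range (yh :: yt).length, ¬ ((yh :: yt).getD j 0 == v) = true := by
        intro j hj
        simp only [List.mem_range] at hj
        simpa using h j hj (by simp)
      rw [List.filter_eq_nil_iff.mpr hall]
      simp
    | cons xh xt =>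
      have htail : ∀ j : Nat, j < yt.length → xt.length ≤ j → yt.getD j 0 ≠ v := by
        intro j hj hx
        simpa using h (j + 1) (by simpa using Nat.succ_lt_succ hj) (by simpa using Nat.succ_le_succ hx)
      have ihk := ih xt htail
      rw [List.length_cons, List.range_succ_eq_map, List.filter_cons, List.filter_map]
      have hpred : ((fun j => (yh :: yt).getD j 0 == v) ∘ (fun j => j + 1)) = (fun j : Nat => yt.getD j 0 == v) := by
        funext j; simp
      have hrest : List.map (fun j => (xh :: xt).getD j 0)
          ((List.filter (fun j : Nat => yt.getD j 0 == v) (List.range yt.length)).map (fun j => j + 1))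
          = List.map (fun j => xt.getD j 0) (List.filter (fun j => yt.getD j 0 == v) (List.range yt.length)) := by
        rw [List.map_map]
        apply List.map_congr_left
        intro j hj
        simp
      rw [hpred]
      by_cases hv : yh = v
      · rw [if_pos (by simp [hv])]
        simp only [List.map_cons, List.sum_cons, List.getD_cons_zero]
        rw [hrest, ihk, List.zip_cons_cons, List.filter_cons, if_pos (by simp [hv])]
        simp
      · rw [if_neg (by simp [hv])]
        rw [hrest, ihk, List.zip_cons_cons, List.filter_cons, if_neg (by simp [hv])]

-- B's dict fold: the accumulated value at key k is the start value plus the sum of the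
-- second components of the pairs whose first component equals k.
theorem dictFold_getD (ps : List (Int × Int)) (d : PySem.Dict Int Int) (k : Int) :
    ((ps.foldl (fun d p => d.insert p.1 (d.getD p.1 0 + p.2)) d).getD k 0)
      = d.getD k 0 + ((ps.filter (fun p => p.1 == k)).map Prod.snd).sum := by
  induction ps generalizing d with
  | nil => simp
  | cons p ps ih =>
    simp only [List.foldl_cons, List.filter_cons]
    rw [ih]
    by_cases hk : p.1 = k
    · rw [if_pos (by simp [hk]), PySem.Dict.getD_insert]
      rw [if_pos hk.symm]
      subst hk
      simp only [List.map_cons, List.sum_cons]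
      ring
    · rw [if_neg (by simp [hk]), PySem.Dict.getD_insert, if_neg (fun h => hk h.symm)]

theorem likelihood_probability_spec : Claim_equal_likelihood_probability := by
  intro x y a _ hpre
  unfold Spec_likelihood_probability likelihood_probability likelihood_probability_alt
  rw [PySem.List.foldl_append_singleton_eq_map, List.nil_append]
  have hmap : (PySem.List.pyRange 0 (a.length : Int) 1).map (fun i => PySem.List.pyGetD a i 0) = a :=
    PySem.List.map_pyGetD_pyRange_zero a 0
  conv_lhs =>
    rw [show (fun i => ((PySem.List.pyRange 0 (y.length : Int) 1).foldl (fun temp j =>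
          if PySem.List.pyGetD y j 0 == PySem.List.pyGetD a i 0 then
            temp ++ [PySem.List.pyGetD x j 0] else temp) []).sum + 1)
        = (fun v => ((PySem.List.pyRange 0 (y.length : Int) 1).foldl (fun temp j =>
          if PySem.List.pyGetD y j 0 == v then
            temp ++ [PySem.List.pyGetD x j 0] else temp) []).sum + 1) ∘ (fun i => PySem.List.pyGetD a i 0)
        from rfl]
    rw [← List.map_map, hmap]
  apply List.map_congr_left
  intro v hv
  rw [PySem.List.foldl_append_if, List.nil_append]
  rw [dictFold_getD]
  simp only [PySem.Dict.getD_empty, zero_add]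
  congr 1
  have hnv : ∀ j : Nat, j < y.length → x.length ≤ j → y.getD j 0 ≠ v := by
    intro j hj hx heq
    have := hpre j hj hx
    rw [heq] at this
    simp only [List.contains_eq_mem, decide_eq_false_iff_not] at this
    exact this hv
  rw [← innerSum_eq_zip y x v hnv]
  rw [PySem.List.pyRange_zero_nat]
  rw [List.filter_map, List.map_map]
  have h1 : List.filter ((fun j => PySem.List.pyGetD y j 0 == v) ∘ fun k : Nat => (k : Int)) (List.range y.length)
      = List.filter (fun j => y.getD j 0 == v) (List.range y.length) := by
    apply List.filter_congr
    intro j hj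
    simp [Function.comp, PySem.List.pyGetD_natCast]
  rw [h1]
  congr 1
  apply List.map_congr_left
  intro j hj
  simp [Function.comp, PySem.List.pyGetD_natCast]
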